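-- pv_equiv track=rewrite | github.com/EmuVlucht/Tools | obfuscator_lanjutan/JS_obfuscator.py | _format_url_params
-- ===== SOURCE A (Python) =====
-- URL_PREFIX = "https://chat.whatsapp.com/LZU6fs32eGnHtWaI3IIg4Y?"
--
-- def _lcg_next(state):
--     """Linear Congruential Generator step"""
--     return (state * 1103515245 + 12345) & 0x7fffffff
--
-- def _add_noise(data: str, seed: int) -> str:
--     """Tambahkan noise chars . dan + secara deterministik"""
--     result = list(data)
--     noise_chars = '.+'
--     count = max(2, len(data) // 10)
--
--     state = seed & 0x7fffffff
--     for i in range(count):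
--         state = _lcg_next(state)
--         pos = state % (len(result) + 1)
--         noise = noise_chars[i % 2]
--         result.insert(pos, noise)
--     return ''.join(result)
--
-- def _format_url_params(data: str, seed: int) -> str:
--     """Format sebagai URL parameters"""
--     data = _add_noise(data, seed)
--
--     state = (seed + 999) & 0x7fffffff
--     result = []
--     i = 0
--     while i < len(data):
--         state = _lcg_next(state)
--         key_len = min((state % 14) + 5, len(data) - i)
--         if key_len <= 0:
--             break
--         key = data[i:i + key_len]
--         i += key_len
--
--         state = _lcg_next(state)
--         val_len = min((state % 56) + 15, len(data) - i)
--         value = data[i:i + val_len] if val_len > 0 else ""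
--         i += val_len
--
--         if result:
--             result.append(f"&{key}={value}")
--         else:
--             result.append(f"{key}={value}")
--
--     return URL_PREFIX + ''.join(result)
-- ===== SOURCE B (Python) =====
-- URL_PREFIX = "https://chat.whatsapp.com/LZU6fs32eGnHtWaI3IIg4Y?"
--
-- def _format_url_params(data: str, seed: int) -> str:
--     n0 = len(data)
--     count = max(2, n0 // 10)
--     # phase 1: record every insertion (position, char) first, then realise them
--     # back-to-front by dropping each char into the k-th free slot of the final
--     # array (kept as the list of still-free indices), streaming the original
--     # data into the remaining free slots.
--     state = seed & 0x7fffffff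
--     ops = []
--     for i in range(count):
--         state = (state * 1103515245 + 12345) & 0x7fffffff
--         ops.append((state % (n0 + i + 1), '.+'[i % 2]))
--     N = n0 + count
--     slots = [None] * N
--     free = list(range(N))
--     for pos, ch in reversed(ops):
--         slots[free[pos]] = ch
--         del free[pos]
--     it = iter(data)
--     noisy = ''.join(c if c is not None else next(it) for c in slots)
--     # phase 2: emit "key=value" pieces and join once with '&'
--     state = (seed + 999) & 0x7fffffff
--     pieces = []
--     i = 0
--     n = len(noisy)
--     while i < n:
--         state = (state * 1103515245 + 12345) & 0x7fffffff
--         k = min(state % 14 + 5, n - i)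
--         state = (state * 1103515245 + 12345) & 0x7fffffff
--         v = min(state % 56 + 15, n - i - k)
--         pieces.append(noisy[i:i+k] + "=" + noisy[i+k:i+k+v])
--         i += k + v
--     return URL_PREFIX + "&".join(pieces)
-- ===== Notes on version B (the rewrite author's own statement) =====
-- stated objective: faster
-- what changed: B records all noise-insertion (position, char) ops first and realises them back-to-front by writing each char into the pos-th still-free slot of the final array (a shrinking free-index list), instead of A's repeated list.insert into the growing result; the URL pieces are built as a list of 'key=value' strings joined once with '&' instead of conditionally '&'-prefixed appends.
import Mathlib
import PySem

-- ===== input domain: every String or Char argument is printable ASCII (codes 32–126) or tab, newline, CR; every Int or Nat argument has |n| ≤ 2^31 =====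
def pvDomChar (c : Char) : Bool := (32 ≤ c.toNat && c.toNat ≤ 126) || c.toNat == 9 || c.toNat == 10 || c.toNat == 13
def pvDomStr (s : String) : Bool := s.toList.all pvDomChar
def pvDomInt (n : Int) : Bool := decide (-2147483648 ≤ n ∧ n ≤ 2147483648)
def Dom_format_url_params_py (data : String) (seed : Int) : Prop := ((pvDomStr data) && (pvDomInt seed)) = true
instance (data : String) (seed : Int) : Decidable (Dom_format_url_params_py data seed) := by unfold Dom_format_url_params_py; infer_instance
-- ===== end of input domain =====

-- B replaces A's repeated list.insert by recording the insertion ops first and realising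
-- them back-to-front via a shrinking free-index list, and emits the URL pieces as a list
-- joined once with '&'; objective: faster (constant factor, measured;
-- neither version mutates its arguments).

-- ===== PORT A =====

def pvURLPrefix : List Char := "https://chat.whatsapp.com/LZU6fs32eGnHtWaI3IIg4Y?".toList

-- _lcg_next: (state * 1103515245 + 12345) & 0x7fffffff  (PySem.Int.band is Python's &)
def pvLcg (s : Int) : Int := PySem.Int.band (s * 1103515245 + 12345) 2147483647

-- one iteration of _add_noise's for-loop; 'result.insert(pos, noise)' is insertIdx:
-- pos = state % (len(result)+1) lies in [0, len(result)], where Python insert = insertIdx;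
-- '.+'[i % 2] via PySem.List.pyGetD (index 0 or 1, always in range).
def pvNoiseStepA (st : Int × List Char) (i : Nat) : Int × List Char :=
  let state := pvLcg st.1
  let pos := PySem.Int.mod state ((st.2.length : Int) + 1)
  let noise := PySem.List.pyGetD ['.', '+'] ((i % 2 : Nat) : Int) ' '
  (state, st.2.insertIdx pos.toNat noise)

-- _add_noise: count = max(2, len(data)//10) (both sides nonnegative, so Nat division is Python's //)
def pvAddNoiseA (data : String) (seed : Int) : List Char :=
  let result := data.toList
  let count := max 2 (result.length / 10)
  ((List.range count).foldl pvNoiseStepA (PySem.Int.band seed 2147483647, result)).2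

-- the while-loop of _format_url_params; i only ever grows (Python's i is a Nat here), and
-- key_len/val_len are min of two nonnegative ints, kept as Nat ((state % m).toNat is exact
-- because PySem.Int.mod with a positive modulus is nonnegative).
-- fuel only makes the recursion structural: each iteration advances i by at least 1, so
-- fuel = chars.length + 1 is never exhausted before i ≥ chars.length.
def pvChunkA (chars : List Char) (fuel : Nat) (state : Int) (i : Nat) (acc : List (List Char)) : List (List Char) :=
  match fuel with
  | 0 => acc
  | fuel + 1 =>
  if i < chars.length then
    let st1 := pvLcg state
    let key_len := min ((PySem.Int.mod st1 14).toNat + 5) (chars.length - i)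
    if key_len = 0 then acc
    else
      let key := PySem.List.slice chars (some (i : Int)) (some ((i : Int) + (key_len : Int)))
      let i2 := i + key_len
      let st2 := pvLcg st1
      let val_len := min ((PySem.Int.mod st2 56).toNat + 15) (chars.length - i2)
      let value := if 0 < val_len then PySem.List.slice chars (some (i2 : Int)) (some ((i2 : Int) + (val_len : Int))) else []
      let piece := if acc.isEmpty then key ++ '=' :: value else '&' :: (key ++ '=' :: value)
      pvChunkA chars fuel st2 (i2 + val_len) (acc ++ [piece])
  else acc

def format_url_params_py (data : String) (seed : Int) : String :=
  let noisy := pvAddNoiseA data seed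
  let state0 := PySem.Int.band (seed + 999) 2147483647
  String.ofList (pvURLPrefix ++ (pvChunkA noisy (noisy.length + 1) state0 0 []).flatten)

-- ===== PORT B =====

-- the op-recording loop of Source B (the LCG expression is inlined, as in Source B)
def pvOpsStepB (L : Nat) (st : Int × List (Nat × Char)) (i : Nat) : Int × List (Nat × Char) :=
  let state := PySem.Int.band (st.1 * 1103515245 + 12345) 2147483647
  (state, st.2 ++ [((PySem.Int.mod state ((L : Nat) + i + 1 : Nat)).toNat,
                    PySem.List.pyGetD ['.', '+'] ((i % 2 : Nat) : Int) ' ')])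

-- Source B's placement step: slots[free[pos]] = ch; del free[pos]
-- (free[pos] via PySem.List.pyGetD; 'del free[pos]' is eraseIdx, exact for an in-range index)
def pvPlaceStep (sf : List (Option Char) × List Nat) (pc : Nat × Char) : List (Option Char) × List Nat :=
  (sf.1.set (PySem.List.pyGetD sf.2 ((pc.1 : Nat) : Int) 0) (some pc.2), sf.2.eraseIdx pc.1)

-- Source B's final join: occupied slots keep their char, free slots consume the data in order
def pvFillFree (S : List (Option Char)) (ys : List Char) : List Char :=
  match S, ys with
  | [], _ => []
  | some x :: rest, ys => x :: pvFillFree rest ys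
  | none :: rest, y :: ys => y :: pvFillFree rest ys
  | none :: rest, [] => pvFillFree rest []

def pvAddNoiseB (data : String) (seed : Int) : List Char :=
  let L := data.toList.length
  let count := max 2 (L / 10)
  let ops := ((List.range count).foldl (pvOpsStepB L) (PySem.Int.band seed 2147483647, [])).2
  let slots := (ops.reverse.foldl pvPlaceStep (List.replicate (L + count) none, List.range (L + count))).1
  pvFillFree slots data.toList

-- Source B's while-loop: build the list of "key=value" pieces
def pvChunkB (chars : List Char) (fuel : Nat) (state : Int) (i : Nat) : List (List Char) :=
  match fuel with
  | 0 => []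
  | fuel + 1 =>
  if i < chars.length then
    let st1 := PySem.Int.band (state * 1103515245 + 12345) 2147483647
    let k := min ((PySem.Int.mod st1 14).toNat + 5) (chars.length - i)
    let st2 := PySem.Int.band (st1 * 1103515245 + 12345) 2147483647
    let v := min ((PySem.Int.mod st2 56).toNat + 15) (chars.length - i - k)
    (PySem.List.slice chars (some (i : Int)) (some ((i : Int) + (k : Int))) ++
      '=' :: PySem.List.slice chars (some ((i + k : Nat) : Int)) (some (((i + k : Nat) : Int) + (v : Int))))
      :: pvChunkB chars fuel st2 (i + k + v)
  else []

def format_url_params_py_alt (data : String) (seed : Int) : String :=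
  let noisy := pvAddNoiseB data seed
  let state0 := PySem.Int.band (seed + 999) 2147483647
  String.ofList (pvURLPrefix ++ List.intercalate ['&'] (pvChunkB noisy (noisy.length + 1) state0 0))

-- ===== PRECONDITION & SPEC =====
def Spec_format_url_params_py (data : String) (seed : Int) (out : String) : Prop := out = format_url_params_py_alt data seed
instance (data : String) (seed : Int) (out : String) : Decidable (Spec_format_url_params_py data seed out) := by unfold Spec_format_url_params_py; infer_instance

-- ===== CLAIM (what is proved, stated in full; the proofs are below) =====
def Claim_equal_format_url_params_py : Prop := ∀ (data : String) (seed : Int), Dom_format_url_params_py data seed → Spec_format_url_params_py data seed (format_url_params_py data seed)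

-- ===== LEMMAS AND PROOFS =====

-- apply a list of insertion ops left to right (what A's loop does to 'result')
def pvInsAll (xs : List Char) (ops : List (Nat × Char)) : List Char :=
  ops.foldl (fun a pc => a.insertIdx pc.1 pc.2) xs

-- ops are valid w.r.t. a growing list: the i-th op position is ≤ m + i
def pvValid (m : Nat) : List (Nat × Char) → Prop
  | [] => True
  | (p, _) :: rest => p ≤ m ∧ pvValid (m + 1) rest

-- validity of a reversed op list against a shrinking free count
def pvRValid (f : Nat) : List (Nat × Char) → Prop
  | [] => True
  | (p, _) :: rest => p < f ∧ pvRValid (f - 1) rest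

def pvFreeCount (S : List (Option Char)) : Nat := S.countP (· = none)

-- proof-side model of one placement: put c into the k-th free (none) slot, 0-indexed
def pvPutFree (S : List (Option Char)) (k : Nat) (c : Char) : List (Option Char) :=
  match S, k with
  | [], _ => []
  | none :: rest, 0 => some c :: rest
  | none :: rest, Nat.succ k' => none :: pvPutFree rest k' c
  | some x :: rest, k => some x :: pvPutFree rest k c

-- the indices of the free slots, in increasing order (what Source B's 'free' list holds)
def pvNoneIdx : List (Option Char) → List Nat
  | [] => []
  | none :: rest => 0 :: (pvNoneIdx rest).map (· + 1)
  | some _ :: rest => (pvNoneIdx rest).map (· + 1)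

theorem pvFreeCount_cons_none (S : List (Option Char)) : pvFreeCount (none :: S) = pvFreeCount S + 1 := by
  simp [pvFreeCount]

theorem pvFreeCount_cons_some (x : Char) (S : List (Option Char)) : pvFreeCount (some x :: S) = pvFreeCount S := by
  simp [pvFreeCount]

theorem pvFreeCount_put (S : List (Option Char)) (k : Nat) (c : Char) (h : k < pvFreeCount S) :
    pvFreeCount (pvPutFree S k c) = pvFreeCount S - 1 := by
  induction S, k using pvPutFree.induct with
  | case1 k => simp [pvFreeCount] at h
  | case2 rest => simp [pvPutFree, pvFreeCount_cons_none, pvFreeCount_cons_some]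
  | case3 rest k' ih =>
    rw [pvFreeCount_cons_none] at h
    simp only [pvPutFree, pvFreeCount_cons_none]
    have := ih (by omega)
    omega
  | case4 x rest k ih =>
    rw [pvFreeCount_cons_some] at h
    simp only [pvPutFree, pvFreeCount_cons_some]
    exact ih h

theorem pvFill_put (S : List (Option Char)) (k : Nat) (c : Char) (ys : List Char)
    (h1 : k < pvFreeCount S) (h2 : ys.length + 1 = pvFreeCount S) :
    pvFillFree (pvPutFree S k c) ys = pvFillFree S (ys.insertIdx k c) := by
  induction S, k using pvPutFree.induct generalizing ys with
  | case1 k => simp [pvFreeCount] at h1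
  | case2 rest => simp [pvPutFree, pvFillFree]
  | case3 rest k' ih =>
    rw [pvFreeCount_cons_none] at h1 h2
    cases ys with
    | nil => simp at h2; omega
    | cons y ys' =>
      simp only [pvPutFree, pvFillFree, List.insertIdx_succ_cons]
      rw [ih ys' (by omega) (by simp at h2 ⊢; omega)]
  | case4 x rest k ih =>
    rw [pvFreeCount_cons_some] at h1 h2
    simp only [pvPutFree, pvFillFree]
    rw [ih ys h1 h2]

theorem pvFill_replicate (ys : List Char) : pvFillFree (List.replicate ys.length none) ys = ys := by
  induction ys with
  | nil => simp [pvFillFree]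
  | cons y ys ih => simp [List.replicate, pvFillFree, ih]

theorem pvNoneIdx_length (S : List (Option Char)) : (pvNoneIdx S).length = pvFreeCount S := by
  induction S with
  | nil => rfl
  | cons a rest ih =>
    cases a <;> simp [pvNoneIdx, pvFreeCount] at * <;> omega

theorem pvGetD_map_add_one (l : List Nat) (k : Nat) (h : k < l.length) :
    (l.map (· + 1)).getD k 0 = l.getD k 0 + 1 := by
  simp [List.getD_eq_getElem?_getD, h]

theorem pvSet_noneIdx (S : List (Option Char)) : ∀ (k : Nat) (c : Char), k < pvFreeCount S →
    S.set ((pvNoneIdx S).getD k 0) (some c) = pvPutFree S k c := by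
  induction S with
  | nil => intro k c h; simp [pvFreeCount] at h
  | cons a rest ih =>
    intro k c h
    cases a with
    | none =>
      cases k with
      | zero => simp [pvNoneIdx, pvPutFree]
      | succ k' =>
        rw [pvFreeCount] at h
        have hk : k' < pvFreeCount rest := by simp [pvFreeCount] at h ⊢; omega
        simp only [pvNoneIdx, pvPutFree, List.getD_cons_succ]
        rw [pvGetD_map_add_one _ _ (by rw [pvNoneIdx_length]; exact hk), List.set_cons_succ]
        rw [ih k' c hk]
    | some x =>
      rw [pvFreeCount] at h
      have hk : k < pvFreeCount rest := by simp [pvFreeCount] at h ⊢; omega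
      simp only [pvNoneIdx, pvPutFree]
      rw [pvGetD_map_add_one _ _ (by rw [pvNoneIdx_length]; exact hk), List.set_cons_succ]
      rw [ih k c hk]

theorem pvErase_noneIdx (S : List (Option Char)) : ∀ (k : Nat) (c : Char), k < pvFreeCount S →
    pvNoneIdx (pvPutFree S k c) = (pvNoneIdx S).eraseIdx k := by
  induction S with
  | nil => intro k c h; simp [pvFreeCount] at h
  | cons a rest ih =>
    intro k c h
    cases a with
    | none =>
      cases k with
      | zero => simp [pvNoneIdx, pvPutFree]
      | succ k' =>
        rw [pvFreeCount] at h
        have hk : k' < pvFreeCount rest := by simp [pvFreeCount] at h ⊢; omega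
        simp only [pvNoneIdx, pvPutFree, List.eraseIdx_cons_succ]
        rw [ih k' c hk, List.eraseIdx_map]
    | some x =>
      rw [pvFreeCount] at h
      have hk : k < pvFreeCount rest := by simp [pvFreeCount] at h ⊢; omega
      simp only [pvNoneIdx, pvPutFree]
      rw [ih k c hk, List.eraseIdx_map]

theorem pvNoneIdx_replicate (n : Nat) : pvNoneIdx (List.replicate n none) = List.range n := by
  induction n with
  | zero => rfl
  | succ n ih => rw [List.replicate_succ, pvNoneIdx, ih, List.range_succ_eq_map]

theorem pvPlace_fold (rops : List (Nat × Char)) : ∀ (S : List (Option Char)),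
    pvRValid (pvFreeCount S) rops →
    rops.foldl pvPlaceStep (S, pvNoneIdx S)
      = (rops.foldl (fun s pc => pvPutFree s pc.1 pc.2) S,
         pvNoneIdx (rops.foldl (fun s pc => pvPutFree s pc.1 pc.2) S)) := by
  induction rops with
  | nil => intro S _; rfl
  | cons pc rest ih =>
    intro S h
    obtain ⟨h1, h2⟩ := h
    simp only [List.foldl_cons]
    have hstep : pvPlaceStep (S, pvNoneIdx S) pc = (pvPutFree S pc.1 pc.2, pvNoneIdx (pvPutFree S pc.1 pc.2)) := by
      unfold pvPlaceStep
      rw [PySem.List.pyGetD_natCast]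
      rw [pvSet_noneIdx S pc.1 pc.2 h1, pvErase_noneIdx S pc.1 pc.2 h1]
    rw [hstep]
    apply ih
    rw [pvFreeCount_put S pc.1 pc.2 h1]
    exact h2

theorem pvFreeCount_fold (rops : List (Nat × Char)) : ∀ (S : List (Option Char)),
    pvRValid (pvFreeCount S) rops →
    pvFreeCount (rops.foldl (fun s pc => pvPutFree s pc.1 pc.2) S) = pvFreeCount S - rops.length := by
  induction rops with
  | nil => intro S _; simp
  | cons pc rest ih =>
    intro S h
    obtain ⟨h1, h2⟩ := h
    simp only [List.foldl_cons, List.length_cons]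
    rw [ih _ (by rw [pvFreeCount_put S pc.1 pc.2 h1]; exact h2), pvFreeCount_put S pc.1 pc.2 h1]
    omega

theorem pvRValid_append (l : List (Nat × Char)) : ∀ (f p : Nat) (c : Char),
    pvRValid f l → p < f - l.length → pvRValid f (l ++ [(p, c)]) := by
  induction l with
  | nil => intro f p c _ h2; exact ⟨by omega, trivial⟩
  | cons pc rest ih =>
    intro f p c h1 h2
    obtain ⟨ha, hb⟩ := h1
    exact ⟨ha, ih (f - 1) p c hb (by simp at h2 ⊢; omega)⟩

theorem pvValid_reverse (ops : List (Nat × Char)) : ∀ (m : Nat), pvValid m ops →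
    pvRValid (m + ops.length) ops.reverse := by
  induction ops with
  | nil => intro m _; trivial
  | cons pc rest ih =>
    intro m h
    obtain ⟨ha, hb⟩ := h
    have := ih (m + 1) hb
    simp only [List.reverse_cons, List.length_cons]
    apply pvRValid_append
    · have e : m + (rest.length + 1) = m + 1 + rest.length := by omega
      rw [e]; exact this
    · simp; omega

-- the back-to-front free-slot placement realises the insertion sequence
theorem pvPlace_eq_insAll (ops : List (Nat × Char)) : ∀ (base : List Char),
    pvValid base.length ops →
    pvFillFree (ops.reverse.foldl (fun s pc => pvPutFree s pc.1 pc.2)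
        (List.replicate (base.length + ops.length) none)) base = pvInsAll base ops := by
  induction ops with
  | nil => intro base _; simpa [pvInsAll] using pvFill_replicate base
  | cons pc rest ih =>
    intro base h
    obtain ⟨ha, hb⟩ := h
    have hlen : (base.insertIdx pc.1 pc.2).length = base.length + 1 := by
      rw [List.length_insertIdx_of_le_length ha]
    set N := base.length + (pc :: rest).length with hN
    have hrep : pvFreeCount ((List.replicate N none : List (Option Char))) = N := by
      simp [pvFreeCount, List.countP_replicate]
    have hrv : pvRValid N rest.reverse := by
      have := pvValid_reverse rest (base.length + 1) hb
      have e : base.length + 1 + rest.length = N := by simp [hN]; omega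
      rwa [e] at this
    have hM : pvFreeCount (rest.reverse.foldl (fun s pc => pvPutFree s pc.1 pc.2)
        (List.replicate N none)) = base.length + 1 := by
      rw [pvFreeCount_fold _ _ (by rwa [hrep]), hrep]
      simp [hN]; omega
    simp only [List.reverse_cons, List.foldl_append, List.foldl_cons, List.foldl_nil]
    rw [pvFill_put _ _ _ _ (by rw [hM]; omega) (by rw [hM])]
    have := ih (base.insertIdx pc.1 pc.2) (by rw [hlen]; exact hb)
    rw [hlen] at this
    have e2 : base.length + 1 + rest.length = N := by simp [hN]; omega
    rw [e2] at this
    rw [this]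
    simp [pvInsAll]

theorem pvValid_append (l : List (Nat × Char)) : ∀ (m p : Nat) (c : Char),
    pvValid m l → p ≤ m + l.length → pvValid m (l ++ [(p, c)]) := by
  induction l with
  | nil => intro m p c _ h2; exact ⟨by simpa using h2, trivial⟩
  | cons pc rest ih =>
    intro m p c h1 h2
    obtain ⟨ha, hb⟩ := h1
    exact ⟨ha, ih (m + 1) p c hb (by simp at h2 ⊢; omega)⟩

theorem pvInsAll_append (xs : List Char) (l : List (Nat × Char)) (pc : Nat × Char) :
    pvInsAll xs (l ++ [pc]) = (pvInsAll xs l).insertIdx pc.1 pc.2 := by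
  simp [pvInsAll, List.foldl_append]

-- joint invariant of the two phase-1 loops: same state stream, A's list is the ops applied,
-- lengths, and validity of the recorded ops
theorem pvNoise_fold (base : List Char) (st : Int) (n : Nat) :
    ((List.range n).foldl pvNoiseStepA (st, base)).1
        = ((List.range n).foldl (pvOpsStepB base.length) (st, [])).1
    ∧ ((List.range n).foldl pvNoiseStepA (st, base)).2
        = pvInsAll base ((List.range n).foldl (pvOpsStepB base.length) (st, [])).2
    ∧ ((List.range n).foldl pvNoiseStepA (st, base)).2.length = base.length + n
    ∧ pvValid base.length ((List.range n).foldl (pvOpsStepB base.length) (st, [])).2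
    ∧ ((List.range n).foldl (pvOpsStepB base.length) (st, [])).2.length = n := by
  induction n with
  | zero => exact ⟨rfl, by simp [pvInsAll], by simp, trivial, rfl⟩
  | succ n ih =>
    obtain ⟨h1, h2, h3, h4, h5⟩ := ih
    rw [List.range_succ, List.foldl_append, List.foldl_append]
    set A := (List.range n).foldl pvNoiseStepA (st, base) with hA
    set B := (List.range n).foldl (pvOpsStepB base.length) (st, []) with hB
    simp only [List.foldl_cons, List.foldl_nil]
    have hmodpos : (0 : Int) < (base.length : Int) + n + 1 := by positivity
    have hmode : ((A.2.length : Int) + 1) = ((base.length + n + 1 : Nat) : Int) := by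
      rw [h3]; push_cast; ring
    have hstate : pvLcg A.1 = PySem.Int.band (B.1 * 1103515245 + 12345) 2147483647 := by
      rw [h1]; rfl
    have hposbound : (PySem.Int.mod (pvLcg A.1) ((A.2.length : Int) + 1)).toNat ≤ base.length + n := by
      have hnn := PySem.Int.mod_nonneg (pvLcg A.1) (b := (A.2.length : Int) + 1) (by rw [hmode]; exact_mod_cast hmodpos)
      have hlt := PySem.Int.mod_lt (pvLcg A.1) (b := (A.2.length : Int) + 1) (by rw [hmode]; exact_mod_cast hmodpos)
      rw [hmode] at hlt ⊢
      rw [hmode] at hnn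
      omega
    refine ⟨?_, ?_, ?_, ?_, ?_⟩
    · simp only [pvNoiseStepA, pvOpsStepB]; exact hstate
    · simp only [pvNoiseStepA, pvOpsStepB]
      rw [pvInsAll_append, ← h2, ← hstate, hmode]
    · simp only [pvNoiseStepA]
      rw [List.length_insertIdx_of_le_length (by rw [h3] at hposbound ⊢; exact hposbound), h3]
      omega
    · simp only [pvOpsStepB]
      apply pvValid_append _ _ _ _ h4
      rw [h5, ← hstate]
      rw [hmode] at hposbound
      exact hposbound
    · simp only [pvOpsStepB]; simp [h5]

theorem pvAddNoise_eq (data : String) (seed : Int) : pvAddNoiseA data seed = pvAddNoiseB data seed := by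
  simp only [pvAddNoiseA, pvAddNoiseB]
  obtain ⟨_, h2, _, h4, h5⟩ :=
    pvNoise_fold data.toList (PySem.Int.band seed 2147483647) (max 2 (data.toList.length / 10))
  set L := data.toList.length with hL
  set c0 := max 2 (L / 10) with hc0
  set ops := ((List.range c0).foldl (pvOpsStepB L) (PySem.Int.band seed 2147483647, [])).2 with hops
  have hfc : pvFreeCount (List.replicate (L + c0) (none : Option Char)) = L + c0 := by
    simp [pvFreeCount, List.countP_replicate]
  have hrv : pvRValid (pvFreeCount (List.replicate (L + c0) (none : Option Char))) ops.reverse := by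
    rw [hfc]
    have := pvValid_reverse ops L h4
    rwa [h5] at this
  have hfold := pvPlace_fold ops.reverse (List.replicate (L + c0) none) hrv
  rw [pvNoneIdx_replicate] at hfold
  rw [hfold]
  have hplace := pvPlace_eq_insAll ops data.toList h4
  rw [h5] at hplace
  rw [hplace]
  exact h2

theorem pvIntercalate_amp (xs : List (List Char)) : ∀ (x : List Char),
    List.intercalate ['&'] (x :: xs) = x ++ xs.flatMap (fun p => '&' :: p) := by
  induction xs with
  | nil => intro x; simp [List.intercalate]
  | cons y ys ih =>
    intro x
    have e : List.intercalate ['&'] (x :: y :: ys) = x ++ ['&'] ++ List.intercalate ['&'] (y :: ys) := by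
      simp [List.intercalate, List.intersperse]
    rw [e, ih y]
    simp

theorem pvValueIf_eq (chars : List Char) (j v : Nat) :
    (if 0 < v then PySem.List.slice chars (some (j : Int)) (some ((j : Int) + (v : Int))) else [])
      = PySem.List.slice chars (some (j : Int)) (some ((j : Int) + (v : Int))) := by
  by_cases hv : 0 < v
  · rw [if_pos hv]
  · rw [if_neg hv]
    have hv0 : v = 0 := by omega
    subst hv0
    rw [PySem.List.slice_natCast_add chars j 0]
    simp

-- once A's accumulator is nonempty, every remaining piece carries a '&' prefix
theorem pvChunk_rel (chars : List Char) : ∀ (fuel : Nat) (state : Int) (i : Nat) (acc : List (List Char)),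
    acc ≠ [] →
    (pvChunkA chars fuel state i acc).flatten
      = acc.flatten ++ (pvChunkB chars fuel state i).flatMap (fun p => '&' :: p) := by
  intro fuel
  induction fuel with
  | zero =>
    intro state i acc _
    simp [pvChunkA, pvChunkB]
  | succ n ih =>
    intro state i acc hne
    by_cases h : i < chars.length
    · rw [pvChunkA, pvChunkB, if_pos h, if_pos h]
      simp only [pvLcg, Nat.sub_sub]
      set st1 := PySem.Int.band (state * 1103515245 + 12345) 2147483647 with hst1
      set k := min ((PySem.Int.mod st1 14).toNat + 5) (chars.length - i) with hk
      set st2 := PySem.Int.band (st1 * 1103515245 + 12345) 2147483647 with hst2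
      set v := min ((PySem.Int.mod st2 56).toNat + 15) (chars.length - (i + k)) with hv
      rw [if_neg (by omega)]
      rw [List.isEmpty_eq_false_iff.mpr hne]
      rw [if_neg (by simp)]
      rw [pvValueIf_eq chars (i + k) v]
      rw [ih st2 (i + k + v) _ (by simp)]
      simp [List.flatten_append, List.flatMap_cons]
    · rw [pvChunkA, pvChunkB, if_neg h, if_neg h]
      simp

theorem pvChunk_eq (chars : List Char) (fuel : Nat) (state : Int) :
    (pvChunkA chars (fuel + 1) state 0 []).flatten = List.intercalate ['&'] (pvChunkB chars (fuel + 1) state 0) := by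
  by_cases h : 0 < chars.length
  · rw [pvChunkA, pvChunkB, if_pos h, if_pos h]
    simp only [pvLcg, Nat.sub_sub]
    set st1 := PySem.Int.band (state * 1103515245 + 12345) 2147483647 with hst1
    set k := min ((PySem.Int.mod st1 14).toNat + 5) (chars.length - 0) with hk
    set st2 := PySem.Int.band (st1 * 1103515245 + 12345) 2147483647 with hst2
    set v := min ((PySem.Int.mod st2 56).toNat + 15) (chars.length - (0 + k)) with hv
    rw [if_neg (by omega)]
    rw [pvValueIf_eq chars (0 + k) v]
    rw [pvIntercalate_amp]
    simp only [List.isEmpty_nil, if_pos]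
    rw [pvChunk_rel chars fuel st2 (0 + k + v) _ (by simp)]
    simp
  · rw [pvChunkA, pvChunkB, if_neg h, if_neg h]
    simp [List.intercalate]

-- ===== VERDICT (by name: the statement is the Claim_ definition above) =====
theorem format_url_params_py_spec : Claim_equal_format_url_params_py := by
  intro data seed _
  unfold Spec_format_url_params_py format_url_params_py format_url_params_py_alt
  simp only [pvAddNoise_eq, pvChunk_eq]
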